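-- pv_equiv track=rewrite | github.com/MattiaOldani/Advent-of-Code | 2025/Day-09/part-02.py | fall_in_bounds
-- ===== SOURCE A (Python) =====
-- def fall_in_bounds(path, v1, v2):
--     min_x = min(v1[0], v2[0])
--     max_x = max(v1[0], v2[0])
--     min_y = min(v1[1], v2[1])
--     max_y = max(v1[1], v2[1])
--
--     for i in range(len(path) - 1):
--         o1 = path[i]
--         o2 = path[i + 1]
--
--         if o1[0] == o2[0]:
--             pts = [(o1[0], y) for y in range(min(o1[1], o2[1]), max(o1[1], o2[1]) + 1)]
--         else:
--             pts = [(x, o1[1]) for x in range(min(o1[0], o2[0]), max(o1[0], o2[0]) + 1)]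
--
--         if any([min_x < x[0] < max_x and min_y < x[1] < max_y for x in pts]):
--             return True
--
--     return False
-- ===== SOURCE B (Python) =====
-- def fall_in_bounds(path, v1, v2):
--     lo_x, hi_x = min(v1[0], v2[0]), max(v1[0], v2[0])
--     lo_y, hi_y = min(v1[1], v2[1]), max(v1[1], v2[1])
--     for o1, o2 in zip(path, path[1:]):
--         if o1[0] == o2[0]:
--             hit = lo_x < o1[0] < hi_x and max(min(o1[1], o2[1]), lo_y + 1) <= min(max(o1[1], o2[1]), hi_y - 1)
--         else:
--             hit = lo_y < o1[1] < hi_y and max(min(o1[0], o2[0]), lo_x + 1) <= min(max(o1[0], o2[0]), hi_x - 1)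
--         if hit:
--             return True
--     return False
-- ===== Notes on version B (the rewrite author's own statement) =====
-- stated objective: faster
-- what changed: B replaces A's per-segment enumeration of every lattice point (then a linear any-scan) with a constant-time interval-overlap test per consecutive pair, so the cost no longer depends on coordinate magnitudes.
import Mathlib
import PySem

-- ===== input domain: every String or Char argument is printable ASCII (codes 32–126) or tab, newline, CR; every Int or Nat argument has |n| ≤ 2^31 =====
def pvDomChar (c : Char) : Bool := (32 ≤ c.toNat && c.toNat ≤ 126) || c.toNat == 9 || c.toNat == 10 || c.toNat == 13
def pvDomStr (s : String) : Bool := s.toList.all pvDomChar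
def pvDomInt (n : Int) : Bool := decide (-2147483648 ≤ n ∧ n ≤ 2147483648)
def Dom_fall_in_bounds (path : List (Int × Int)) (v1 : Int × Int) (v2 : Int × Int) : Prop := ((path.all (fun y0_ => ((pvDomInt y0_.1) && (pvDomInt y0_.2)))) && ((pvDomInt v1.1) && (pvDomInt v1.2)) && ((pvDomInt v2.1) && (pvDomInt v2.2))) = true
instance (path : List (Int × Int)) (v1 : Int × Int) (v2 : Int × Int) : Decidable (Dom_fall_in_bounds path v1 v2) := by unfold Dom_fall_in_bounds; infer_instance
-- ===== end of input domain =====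

-- B replaces A's per-segment point enumeration by a constant-time interval-overlap test per segment (objective: faster).

-- ===== PORT A =====
-- the for-loop over i in range(len(path)-1) with indexing path[i], path[i+1],
-- transcribed as structural recursion over consecutive pairs with early return
def fallA_go (mnx mxx mny mxy : Int) : List (Int × Int) → Bool
  | o1 :: o2 :: rest =>
    let pts : List (Int × Int) :=
      if o1.1 == o2.1 then
        (PySem.List.pyRange (min o1.2 o2.2) (max o1.2 o2.2 + 1) 1).map (fun y => (o1.1, y))
      else
        (PySem.List.pyRange (min o1.1 o2.1) (max o1.1 o2.1 + 1) 1).map (fun x => (x, o1.2))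
    if pts.any (fun p => decide (mnx < p.1) && decide (p.1 < mxx) && decide (mny < p.2) && decide (p.2 < mxy)) then
      true
    else
      fallA_go mnx mxx mny mxy (o2 :: rest)
  | _ => false

def fall_in_bounds (path : List (Int × Int)) (v1 : Int × Int) (v2 : Int × Int) : Bool :=
  fallA_go (min v1.1 v2.1) (max v1.1 v2.1) (min v1.2 v2.2) (max v1.2 v2.2) path

-- ===== PORT B =====
def segHit (lox hix loy hiy : Int) (o1 o2 : Int × Int) : Bool :=
  if o1.1 == o2.1 then
    decide (lox < o1.1) && decide (o1.1 < hix) &&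
      decide (max (min o1.2 o2.2) (loy + 1) ≤ min (max o1.2 o2.2) (hiy - 1))
  else
    decide (loy < o1.2) && decide (o1.2 < hiy) &&
      decide (max (min o1.1 o2.1) (lox + 1) ≤ min (max o1.1 o2.1) (hix - 1))

def fall_in_bounds_alt (path : List (Int × Int)) (v1 : Int × Int) (v2 : Int × Int) : Bool :=
  (path.zip path.tail).any (fun p =>
    segHit (min v1.1 v2.1) (max v1.1 v2.1) (min v1.2 v2.2) (max v1.2 v2.2) p.1 p.2)

-- ===== PRECONDITION & SPEC =====
def Spec_fall_in_bounds (path : List (Int × Int)) (v1 : Int × Int) (v2 : Int × Int) (out : Bool) : Prop := out = fall_in_bounds_alt path v1 v2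
instance (path : List (Int × Int)) (v1 : Int × Int) (v2 : Int × Int) (out : Bool) : Decidable (Spec_fall_in_bounds path v1 v2 out) := by unfold Spec_fall_in_bounds; infer_instance

-- ===== CLAIM (what is proved, stated in full; the proofs are below) =====
def Claim_equal_fall_in_bounds : Prop := ∀ (path : List (Int × Int)) (v1 : Int × Int) (v2 : Int × Int), Dom_fall_in_bounds path v1 v2 → Spec_fall_in_bounds path v1 v2 (fall_in_bounds path v1 v2)

-- ===== LEMMAS AND PROOFS =====

-- a point of range [a, b] lies strictly between lo and hi  iff  the clipped interval is nonempty
lemma range_any_strict (a b lo hi : Int) (hab : a ≤ b) :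
    (PySem.List.pyRange a (b + 1) 1).any (fun y => decide (lo < y) && decide (y < hi))
      = decide (max a (lo + 1) ≤ min b (hi - 1)) := by
  by_cases hc : max a (lo + 1) ≤ min b (hi - 1)
  · simp only [hc, decide_true, List.any_eq_true, PySem.List.mem_pyRange_one]
    exact ⟨max a (lo + 1), ⟨by omega, by omega⟩, by simp; omega⟩
  · simp only [hc, decide_false, List.any_eq_false, PySem.List.mem_pyRange_one]
    rintro y ⟨h1, h2⟩
    simp
    omega

-- a constant conjunct factors out of List.any
lemma any_const_and {α : Type} (c : Bool) (q : α → Bool) (l : List α) :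
    l.any (fun y => c && q y) = (c && l.any q) := by
  cases c <;> simp

-- one segment of A's scan equals B's O(1) test
lemma seg_eq (mnx mxx mny mxy : Int) (o1 o2 : Int × Int) :
    (if o1.1 == o2.1 then
        (PySem.List.pyRange (min o1.2 o2.2) (max o1.2 o2.2 + 1) 1).map (fun y => (o1.1, y))
      else
        (PySem.List.pyRange (min o1.1 o2.1) (max o1.1 o2.1 + 1) 1).map (fun x => (x, o1.2))).any
      (fun p => decide (mnx < p.1) && decide (p.1 < mxx) && decide (mny < p.2) && decide (p.2 < mxy))
    = segHit mnx mxx mny mxy o1 o2 := by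
  unfold segHit
  by_cases h : o1.1 == o2.1 <;> simp only [h, if_true, if_false, Bool.false_eq_true, List.any_map]
  · rw [show (((fun p : Int × Int => decide (mnx < p.1) && decide (p.1 < mxx) && decide (mny < p.2) && decide (p.2 < mxy))) ∘ (fun y => (o1.1, y)))
        = fun y => (decide (mnx < o1.1) && decide (o1.1 < mxx)) && (decide (mny < y) && decide (y < mxy)) from by
          funext y; simp [Bool.and_assoc]]
    rw [any_const_and, range_any_strict _ _ _ _ (by omega), Bool.and_assoc]
  · rw [show (((fun p : Int × Int => decide (mnx < p.1) && decide (p.1 < mxx) && decide (mny < p.2) && decide (p.2 < mxy))) ∘ (fun x => (x, o1.2)))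
        = fun x => (decide (mny < o1.2) && decide (o1.2 < mxy)) && (decide (mnx < x) && decide (x < mxx)) from by
          funext x; simp only [Function.comp]
          cases decide (mnx < x) <;> cases decide (x < mxx) <;> cases decide (mny < o1.2) <;> cases decide (o1.2 < mxy) <;> rfl]
    rw [any_const_and, range_any_strict _ _ _ _ (by omega), Bool.and_assoc]

lemma go_eq (mnx mxx mny mxy : Int) (path : List (Int × Int)) :
    fallA_go mnx mxx mny mxy path
      = (path.zip path.tail).any (fun p => segHit mnx mxx mny mxy p.1 p.2) := by
  match path with
  | [] => rfl
  | [_] => rfl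
  | o1 :: o2 :: rest =>
    rw [show (o1 :: o2 :: rest).zip (o1 :: o2 :: rest).tail
          = (o1, o2) :: ((o2 :: rest).zip (o2 :: rest).tail) from rfl]
    rw [List.any_cons]
    rw [← go_eq mnx mxx mny mxy (o2 :: rest)]
    show (if _ then true else _) = _
    rw [seg_eq]
    cases segHit mnx mxx mny mxy o1 o2 <;> simp

-- ===== VERDICT (by name: the statement is the Claim_ definition above) =====
theorem fall_in_bounds_spec : Claim_equal_fall_in_bounds := by
  intro path v1 v2 _
  unfold Spec_fall_in_bounds fall_in_bounds fall_in_bounds_alt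
  exact go_eq _ _ _ _ path
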